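-- pv_equiv track=rewrite | github.com/Jongil512/AlgoStudy | SWEA/pycharm/SWEA_1940/1940.py | RCcar
-- ===== SOURCE A (Python) =====
-- def RCcar(arr, n):
--     d = 0
--     v = 0
--     for i in range(n):
--         data = arr[i]
--         if data[0] == 1:
--             v += data[0] * data[1]
--         elif data[0] == 2:
--             if v > 0 and v >= data[1]:
--                 v -= data[1]
--             elif v < data[1]:
--                 v = 0
--         d += v
--     return d
-- ===== SOURCE B (Python) =====
-- def _step(v, data):
--     t = data[0]
--     if t == 1:
--         return v + t * data[1]
--     if t == 2:
--         if v > 0 and v >= data[1]: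
--             return v - data[1]
--         if v < data[1]:
--             return 0
--     return v
--
--
-- def RCcar(arr, n):
--     # Abel summation: total distance = sum over commands of
--     # (number of remaining steps) * (velocity change at that command).
--     cmds = arr[:n] if n >= 0 else []
--     v = 0
--     d = 0
--     w = len(cmds)
--     for data in cmds:
--         u = _step(v, data)
--         d += w * (u - v)
--         v = u
--         w -= 1
--     return d
-- ===== Notes on version B (the rewrite author's own statement) =====
-- stated objective: alternative
-- what changed: B computes the distance by Abel summation - slicing the first n commands once and adding (remaining steps) x (velocity change) at each command - instead of A's adding the current velocity to a running distance after every command; the loop carries (velocity, distance, weight) over the slice rather than indexing arr by range(n).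
import Mathlib
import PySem

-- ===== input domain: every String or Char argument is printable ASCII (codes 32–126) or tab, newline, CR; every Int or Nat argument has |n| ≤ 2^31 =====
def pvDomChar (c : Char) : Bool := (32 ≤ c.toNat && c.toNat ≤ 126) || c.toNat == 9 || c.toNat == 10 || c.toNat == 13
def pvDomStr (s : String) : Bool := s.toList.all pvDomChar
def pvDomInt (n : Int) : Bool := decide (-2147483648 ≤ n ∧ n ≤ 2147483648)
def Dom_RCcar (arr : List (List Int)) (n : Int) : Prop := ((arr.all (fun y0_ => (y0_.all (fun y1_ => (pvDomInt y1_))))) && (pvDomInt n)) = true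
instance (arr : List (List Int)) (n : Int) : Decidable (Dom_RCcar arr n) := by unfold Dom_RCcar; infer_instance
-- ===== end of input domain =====

-- B replaces A's running-velocity sum by Abel summation over the sliced command list:
-- distance = Σ (remaining steps) × (velocity change); same O(n) cost, different arithmetic.

-- ===== PORT A =====
-- loop body of A: state (d, v); arr[i] / data[j] ported with pyGet? (none = IndexError,
-- excluded by Pre_RCcar), .getD supplies a value only outside Pre_.
def stepA (arr : List (List Int)) (st : Int × Int) (i : Int) : Int × Int :=
  let data := (PySem.List.pyGet? arr i).getD []
  let v :=
    if (PySem.List.pyGet? data 0).getD 0 = 1 then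
      st.2 + ((PySem.List.pyGet? data 0).getD 0) * ((PySem.List.pyGet? data 1).getD 0)
    else if (PySem.List.pyGet? data 0).getD 0 = 2 then
      if st.2 > 0 ∧ st.2 ≥ (PySem.List.pyGet? data 1).getD 0 then
        st.2 - (PySem.List.pyGet? data 1).getD 0
      else if st.2 < (PySem.List.pyGet? data 1).getD 0 then 0 else st.2
    else st.2
  (st.1 + v, v)

def RCcar (arr : List (List Int)) (n : Int) : Int :=
  ((PySem.List.pyRange 0 n 1).foldl (stepA arr) (0, 0)).1

-- ===== PORT B =====
-- pure step function _step of Source B (data[j] via pyGet?; default fires only outside Pre_)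
def stepRC (v : Int) (data : List Int) : Int :=
  let t := (PySem.List.pyGet? data 0).getD 0
  if t = 1 then v + t * ((PySem.List.pyGet? data 1).getD 0)
  else if t = 2 then
    if v > 0 ∧ v ≥ (PySem.List.pyGet? data 1).getD 0 then v - (PySem.List.pyGet? data 1).getD 0
    else if v < (PySem.List.pyGet? data 1).getD 0 then 0 else v
  else v

-- Source B's loop: state (v, d, w) folded over the slice arr[:n]
def RCcar_alt (arr : List (List Int)) (n : Int) : Int :=
  let cmds := if 0 ≤ n then PySem.List.slice arr none (some n) else []
  (cmds.foldl
    (fun (st : Int × Int × Int) data =>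
      let u := stepRC st.1 data
      (u, st.2.1 + st.2.2 * (u - st.1), st.2.2 - 1))
    (0, 0, (cmds.length : Int))).2.1

-- ===== PRECONDITION & SPEC =====
-- exactly the inputs where A raises no IndexError: every accessed row exists, is nonempty,
-- and has a second element whenever its command type (first element) is 1 or 2.
def Pre_RCcar (arr : List (List Int)) (n : Int) : Prop :=
  n ≤ (arr.length : Int) ∧
  ∀ row ∈ arr.take n.toNat,
    row ≠ [] ∧ ((row.headI = 1 ∨ row.headI = 2) → 2 ≤ row.length)
instance (arr : List (List Int)) (n : Int) : Decidable (Pre_RCcar arr n) := by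
  unfold Pre_RCcar; infer_instance

def pvWitness_RCcar : List (List Int) × Int := ([[1, 3], [2, 1], [0]], 3)

def Spec_RCcar (arr : List (List Int)) (n : Int) (out : Int) : Prop := out = RCcar_alt arr n
instance (arr : List (List Int)) (n : Int) (out : Int) : Decidable (Spec_RCcar arr n out) := by unfold Spec_RCcar; infer_instance

-- ===== CLAIM (what is proved, stated in full; the proofs are below) =====
def Claim_equal_RCcar : Prop := ∀ (arr : List (List Int)) (n : Int), Dom_RCcar arr n → Pre_RCcar arr n → Spec_RCcar arr n (RCcar arr n)

-- ===== LEMMAS AND PROOFS =====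

-- A's update applied to a fetched row is B's step function on that row.
lemma stepA_eq_stepRC (arr : List (List Int)) (d v i : Int) :
    stepA arr (d, v) i =
      (d + stepRC v ((PySem.List.pyGet? arr i).getD []),
       stepRC v ((PySem.List.pyGet? arr i).getD [])) := by
  simp [stepA, stepRC]

-- the reference fold's first component is affine in the starting distance
lemma foldA_affine (t : List (List Int)) (d e v : Int) :
    (t.foldl (fun (st : Int × Int) c => (st.1 + stepRC st.2 c, stepRC st.2 c)) (d + e, v)).1
    = (t.foldl (fun (st : Int × Int) c => (st.1 + stepRC st.2 c, stepRC st.2 c)) (e, v)).1 + d := by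
  induction t generalizing e v with
  | nil => simpa using add_comm d e
  | cons c t ih =>
      simp only [List.foldl_cons]
      rw [show d + e + stepRC v c = d + (e + stepRC v c) by ring, ih]

-- Abel-summation invariant: folding B's body over cmds starting at weight cmds.length
-- yields the running-velocity sum minus cmds.length × (initial velocity).
lemma abel_loop (cmds : List (List Int)) (v d : Int) :
    (cmds.foldl
      (fun (st : Int × Int × Int) data =>
        let u := stepRC st.1 data
        (u, st.2.1 + st.2.2 * (u - st.1), st.2.2 - 1))
      (v, d, (cmds.length : Int))).2.1
    = (cmds.foldl (fun (st : Int × Int) c => (st.1 + stepRC st.2 c, stepRC st.2 c)) (d, v)).1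
      - (cmds.length : Int) * v := by
  induction cmds generalizing v d with
  | nil => simp
  | cons c t ih =>
      simp only [List.foldl_cons, List.length_cons]
      have h1 : ((t.length + 1 : Nat) : Int) - 1 = (t.length : Int) := by push_cast; ring
      rw [h1, ih (stepRC v c) (d + ((t.length + 1 : Nat) : Int) * (stepRC v c - v))]
      have h2 : d + ((t.length + 1 : Nat) : Int) * (stepRC v c - v)
          = (((t.length : Int)) * stepRC v c - ((t.length + 1 : Nat) : Int) * v) + (d + stepRC v c) := by
        push_cast; ring
      rw [h2, foldA_affine]
      ring

-- A's indexed fold over pyRange a (a+m) equals the list fold over the corresponding segment.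
lemma segment_loop (arr : List (List Int)) (a : Int) (m : Nat) (d v : Int)
    (h0 : 0 ≤ a) (hle : a + m ≤ (arr.length : Int)) :
    (PySem.List.pyRange a (a + m) 1).foldl (stepA arr) (d, v)
    = ((arr.drop a.toNat).take m).foldl
        (fun (st : Int × Int) c => (st.1 + stepRC st.2 c, stepRC st.2 c)) (d, v) := by
  induction m generalizing a d v with
  | zero => simp [PySem.List.pyRange_one_eq_nil]
  | succ m ih =>
      have hlt : a < (arr.length : Int) := by push_cast at hle; omega
      rw [show a + ((m + 1 : Nat) : Int) = a + 1 + (m : Nat) by push_cast; ring,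
          PySem.List.pyRange_one_cons (by omega)]
      have hdrop : arr.drop a.toNat = arr[a.toNat]'(by omega) :: arr.drop ((a + 1).toNat) := by
        rw [List.drop_eq_getElem_cons (by omega : a.toNat < arr.length),
            show (a + 1).toNat = a.toNat + 1 from by omega]
      rw [hdrop]
      simp only [List.take_succ_cons, List.foldl_cons]
      rw [stepA_eq_stepRC, PySem.List.pyGet?_eq_some_getElem arr h0 hlt]
      exact ih (a + 1) _ _ (by omega) (by push_cast at hle ⊢; omega)

-- ===== VERDICT (by name: the statement is the Claim_ definition above) =====
theorem RCcar_spec : Claim_equal_RCcar := by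
  intro arr n _ hpre
  unfold Spec_RCcar RCcar RCcar_alt
  by_cases hn : 0 ≤ n
  · rw [if_pos hn, PySem.List.slice_to arr hn]
    have key := segment_loop arr 0 n.toNat 0 0 le_rfl
      (by have := hpre.1; push_cast at this ⊢; omega)
    rw [show (0 : Int) + (n.toNat : Nat) = n from by omega] at key
    simp only [Int.toNat_zero, List.drop_zero] at key
    rw [key]
    have habel := abel_loop (arr.take n.toNat) 0 0
    simp only [mul_zero, sub_zero] at habel
    exact habel.symm
  · rw [if_neg hn, PySem.List.pyRange_one_eq_nil (by omega)]
    simp
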